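-- pv_equiv track=rewrite | github.com/jiiyeon/Algorithm_Prac | BOJ/stage12/04.py | ft_freq
-- ===== SOURCE A (Python) =====
-- def ft_freq(list):
--     freq_dict = {i: 0 for i in set(list)}
--     i = 0
--     while i < len(list):
--         freq_dict[list[i]] += 1
--         i += 1
--
--     MAX = max(freq_dict.values())
--     max_lst = [x for x in freq_dict if freq_dict[x] == MAX]
--     max_lst = sorted(max_lst)
--
--     if len(max_lst) == 1:
--         res = max_lst[0]
--     else:
--         res = max_lst[1]
--
--     return res
-- ===== SOURCE B (Python) =====
-- def ft_freq(list):
--     s = sorted(list)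
--     pairs = []
--     for v in s:
--         if pairs and pairs[-1][0] == v:
--             pairs[-1] = (v, pairs[-1][1] + 1)
--         else:
--             pairs.append((v, 1))
--     m = max(c for _, c in pairs)
--     winners = [v for v, c in pairs if c == m]
--     return winners[1] if len(winners) > 1 else winners[0]
-- ===== Notes on version B (the rewrite author's own statement) =====
-- stated objective: alternative
-- what changed: Replaces the dict-of-counts built by an index-based while loop plus a key filter and final sort with a sort-first single scan that groups equal consecutive elements into (value,count) runs already in ascending value order.
import Mathlib
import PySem

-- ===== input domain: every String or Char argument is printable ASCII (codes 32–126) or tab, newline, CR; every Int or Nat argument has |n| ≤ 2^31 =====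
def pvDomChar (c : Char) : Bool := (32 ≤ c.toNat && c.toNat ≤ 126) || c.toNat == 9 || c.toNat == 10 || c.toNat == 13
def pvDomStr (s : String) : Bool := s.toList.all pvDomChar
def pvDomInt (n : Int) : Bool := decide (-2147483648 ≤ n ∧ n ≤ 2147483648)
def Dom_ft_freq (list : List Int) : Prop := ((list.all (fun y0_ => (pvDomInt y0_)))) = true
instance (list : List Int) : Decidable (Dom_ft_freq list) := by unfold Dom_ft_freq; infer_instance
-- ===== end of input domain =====

-- B replaces A's dict-of-counts (index-based while loop, then key filter and sort) by sorting
-- first and counting equal consecutive elements in one scan; a genuinely different strategy of similar cost.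

-- ===== PORT A =====
def ft_freq (list : List Int) : Int :=
  let d0 : PySem.Dict Int Int :=
    (PySem.Set.ofList list).foldl (fun d i => d.insert i 0) PySem.Dict.empty
  let d : PySem.Dict Int Int :=
    (PySem.List.pyRange 0 (PySem.List.len list) 1).foldl
      (fun d i => d.insert (PySem.List.pyGetD list i 0) (d.getD (PySem.List.pyGetD list i 0) 0 + 1)) d0
  let MAX : Int := (PySem.List.max? d.values (fun v => v)).getD 0
  let max_lst := d.keys.filter (fun x => d.getD x 0 == MAX)
  let max_lst := PySem.List.sorted max_lst (fun x => x) false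
  if max_lst.length == 1 then PySem.List.pyGetD max_lst 0 0
  else PySem.List.pyGetD max_lst 1 0

-- ===== PORT B =====
def ft_freq_alt (list : List Int) : Int :=
  let s := PySem.List.sorted list (fun x => x) false
  let pairs : List (Int × Int) :=
    s.foldl (fun ps v =>
      match ps.getLast? with
      | some (w, c) => if w == v then ps.dropLast ++ [(v, c + 1)] else ps ++ [(v, 1)]
      | none => [(v, 1)]) []
  let m : Int := (PySem.List.max? (pairs.map (·.2)) (fun c => c)).getD 0
  let winners := (pairs.filter (fun p => p.2 == m)).map (·.1)
  if winners.length > 1 then PySem.List.pyGetD winners 1 0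
  else PySem.List.pyGetD winners 0 0

-- ===== PRECONDITION & SPEC =====
-- Pre_ excludes only the empty list, on which Python's max() raises ValueError (in A and in B alike).
def Pre_ft_freq (list : List Int) : Prop := list ≠ []
instance (list : List Int) : Decidable (Pre_ft_freq list) := by unfold Pre_ft_freq; infer_instance
def pvWitness_ft_freq : List Int := [1]

def Spec_ft_freq (list : List Int) (out : Int) : Prop := out = ft_freq_alt list
instance (list : List Int) (out : Int) : Decidable (Spec_ft_freq list out) := by unfold Spec_ft_freq; infer_instance

-- ===== CLAIM (what is proved, stated in full; the proofs are below) =====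
def Claim_equal_ft_freq : Prop := ∀ (list : List Int), Dom_ft_freq list → Pre_ft_freq list → Spec_ft_freq list (ft_freq list)

-- ===== LEMMAS AND PROOFS =====

-- PySem.List.dedup keeps first occurrences in order, hence is a sublist.
theorem pv_dedup_sublist (xs : List Int) : (PySem.List.dedup xs).Sublist xs := by
  induction xs using List.reverseRecOn with
  | nil => simp [PySem.List.dedup]
  | append_singleton t v ih =>
    rw [PySem.List.dedup_eq_ofList, PySem.Set.ofList_append_singleton]
    by_cases h : v ∈ PySem.Set.ofList t
    · rw [PySem.Set.add_of_mem h]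
      exact ((PySem.List.dedup_eq_ofList t ▸ ih)).trans (t.sublist_append_left [v])
    · rw [PySem.Set.add_of_not_mem h]
      exact ((PySem.List.dedup_eq_ofList t ▸ ih)).append (List.Sublist.refl [v])

theorem pv_dedup_pairwise_lt (xs : List Int) (h : xs.Pairwise (· ≤ ·)) :
    (PySem.List.dedup xs).Pairwise (· < ·) := by
  have h1 : (PySem.List.dedup xs).Pairwise (· ≤ ·) := List.Pairwise.sublist (pv_dedup_sublist xs) h
  have h2 : (PySem.List.dedup xs).Nodup := PySem.List.nodup_dedup xs
  exact (h1.and h2).imp (fun ⟨a, b⟩ => lt_of_le_of_ne a b)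

-- B's run-grouping scan over a ≤-sorted list yields (distinct value, count) pairs.
theorem pv_runs_eq (s : List Int) (h : s.Pairwise (· ≤ ·)) :
    s.foldl (fun ps v =>
      match ps.getLast? with
      | some (w, c) => if w == v then ps.dropLast ++ [(v, c + 1)] else ps ++ [(v, 1)]
      | none => [(v, 1)]) ([] : List (Int × Int))
    = (PySem.List.dedup s).map (fun v => (v, (s.count v : Int))) := by
  induction s using List.reverseRecOn with
  | nil => simp [PySem.List.dedup]
  | append_singleton t v ih =>
    have hsp := List.pairwise_append.mp h
    have ht : t.Pairwise (· ≤ ·) := hsp.1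
    have hv : ∀ x ∈ t, x ≤ v := fun x hx => hsp.2.2 x hx v (by simp)
    rw [List.foldl_append, ih ht]
    rcases eq_or_ne t [] with rfl | hne
    · rw [List.nil_append, show PySem.List.dedup ([] : List Int) = [] from rfl,
        show PySem.List.dedup [v] = [v] from rfl]
      simp [List.count_singleton]
    · set D := PySem.List.dedup t with hD
      have hDne : D ≠ [] := by
        rcases List.exists_mem_of_ne_nil t hne with ⟨x, hx⟩
        intro h0
        have : x ∈ D := (PySem.List.mem_dedup t x).mpr hx
        simp [h0] at this
      set w := D.getLast hDne with hw
      have hsplit : D.dropLast ++ [w] = D := List.dropLast_append_getLast hDne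
      have hDp : D.Pairwise (· ≤ ·) := List.Pairwise.sublist (pv_dedup_sublist t) ht
      have hDlt : D.Pairwise (· < ·) := pv_dedup_pairwise_lt t ht
      have hwt : w ∈ t := (PySem.List.mem_dedup t _).mp (D.getLast_mem hDne)
      have hwle : w ≤ v := hv w hwt
      have hdrople : ∀ x ∈ D.dropLast, x ≤ w := by
        intro x hx
        exact (List.pairwise_append.mp (hsplit ▸ hDp)).2.2 x hx w (by simp)
      have hdropne : ∀ x ∈ D.dropLast, x ≠ w := by
        intro x hx
        exact ne_of_lt ((List.pairwise_append.mp (hsplit ▸ hDlt)).2.2 x hx w (by simp))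
      have hlast : (D.map (fun u => (u, (t.count u : Int)))).getLast? = some (w, (t.count w : Int)) := by
        rw [List.getLast?_map, List.getLast?_eq_some_getLast hDne]
        rfl
      rw [PySem.List.dedup_eq_ofList, PySem.Set.ofList_append_singleton,
        ← PySem.List.dedup_eq_ofList t, ← hD]
      rw [List.foldl_cons, List.foldl_nil]
      simp only [hlast]
      by_cases hvt : v ∈ t
      · have hvD : v ∈ D := (PySem.List.mem_dedup t v).mpr hvt
        have hvw : v = w := by
          rcases (by rw [← hsplit] at hvD; simpa using hvD : v ∈ D.dropLast ∨ v = w) with h1 | h1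
          · exact le_antisymm (hdrople v h1) hwle
          · exact h1
        rw [if_pos (show ((w == v) = true) by simp [hvw]), PySem.Set.add_of_mem hvD]
        rw [← List.map_dropLast]
        nth_rewrite 2 [← hsplit]
        rw [List.map_append]
        congr 1
        · apply List.map_congr_left
          intro x hx
          have hxv : ¬ (x = v) := hvw ▸ hdropne x hx
          have hvx : ¬ (v = x) := fun h1 => hxv h1.symm
          simp [List.count_append, hvx]
        · simp only [List.map_cons, List.map_nil, ← hvw, List.count_append,
            List.count_singleton]
          simp
      · have hvD : v ∉ D := fun hmem => hvt ((PySem.List.mem_dedup t v).mp hmem)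
        rw [if_neg (show ¬ ((w == v) = true) by simpa using (fun h1 : w = v => hvt (h1 ▸ hwt))),
          PySem.Set.add_of_not_mem hvD]
        rw [List.map_append]
        congr 1
        · apply List.map_congr_left
          intro x hx
          have hxv : ¬ (x = v) := fun h1 => hvt (h1 ▸ (PySem.List.mem_dedup t x).mp hx)
          have hvx : ¬ (v = x) := fun h1 => hxv h1.symm
          simp [List.count_append, hvx]
        · simp [List.count_append, List.count_eq_zero_of_not_mem hvt]

-- A's initial dict {i: 0 for i in set(list)} maps every key (and any absent key) to 0.
theorem pv_d0_getD (l : List Int) (v : Int) :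
    ((l.foldl (fun d i => d.insert i 0) PySem.Dict.empty).getD v 0 : Int) = 0 := by
  suffices h : ∀ d : PySem.Dict Int Int, d.getD v 0 = 0 →
      (l.foldl (fun d i => d.insert i 0) d).getD v 0 = 0 by
    exact h _ (PySem.Dict.getD_empty v 0)
  induction l with
  | nil => intro d hd; simpa using hd
  | cons x t ih =>
    intro d hd
    apply ih
    rw [PySem.Dict.getD_insert]
    split_ifs <;> simp [hd]

theorem pv_update_absorb (l : List Int) :
    PySem.Set.update (PySem.Set.ofList l) l = PySem.Set.ofList l := by
  rw [PySem.Set.update_eq_append_filter]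
  have : (PySem.Set.ofList l).filter (fun y => !(PySem.Set.contains (PySem.Set.ofList l) y)) = [] := by
    rw [List.filter_eq_nil_iff]
    intro a ha
    simp [ha]
  rw [this, List.append_nil]

-- max() of a nonempty multiset does not depend on the order it is listed in.
theorem pv_max_perm (xs ys : List Int) (hp : xs.Perm ys) :
    (PySem.List.max? xs (fun v => v)).getD 0 = (PySem.List.max? ys (fun v => v)).getD 0 := by
  rcases hx : PySem.List.max? xs (fun v => v) with _ | m
  · have h0 : xs = [] := (PySem.List.max?_eq_none_iff xs _).mp hx
    have h1 : ys = [] := (h0 ▸ hp : ([] : List Int).Perm ys).symm.eq_nil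
    rw [h1, (PySem.List.max?_eq_none_iff ([] : List Int) _).mpr rfl]
  · rcases hy : PySem.List.max? ys (fun v => v) with _ | m'
    · have h1 : ys = [] := (PySem.List.max?_eq_none_iff ys _).mp hy
      have h0 : xs = [] := (h1 ▸ hp : xs.Perm ([] : List Int)).eq_nil
      rw [h0, (PySem.List.max?_eq_none_iff ([] : List Int) _).mpr rfl] at hx
      exact absurd hx (by simp)
    · have hm : m ∈ ys := hp.mem_iff.mp (PySem.List.max?_mem hx)
      have hm' : m' ∈ xs := hp.mem_iff.mpr (PySem.List.max?_mem hy)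
      have h1 : m ≤ m' := PySem.List.max?_isMax hy m hm
      have h2 : m' ≤ m := PySem.List.max?_isMax hx m' hm'
      simp [le_antisymm h1 h2]

-- the two tail selections agree on every list (indices read through pyGetD with default 0)
theorem pv_tail (L : List Int) :
    (if (L.length == 1) = true then PySem.List.pyGetD L 0 0 else PySem.List.pyGetD L 1 0)
    = (if L.length > 1 then PySem.List.pyGetD L 1 0 else PySem.List.pyGetD L 0 0) := by
  match L with
  | [] => simp [PySem.List.pyGetD, PySem.List.pyGet?, PySem.List.pyIdx?]
  | [a] => simp [PySem.List.pyGetD, PySem.List.pyGet?, PySem.List.pyIdx?]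
  | a :: b :: t => simp [PySem.List.pyGetD, PySem.List.pyGet?, PySem.List.pyIdx?]

-- ===== VERDICT (by name: the statement is the Claim_ definition above) =====
theorem ft_freq_spec : Claim_equal_ft_freq := by
  intro list _ _
  unfold Spec_ft_freq ft_freq ft_freq_alt
  dsimp only
  rw [PySem.List.foldl_pyRange_zero_pyGetD list 0 (fun (d : PySem.Dict Int Int) x => d.insert x (d.getD x 0 + 1))]
  set K := PySem.Set.ofList list with hK
  set d0 : PySem.Dict Int Int := List.foldl (fun d i => d.insert i 0) PySem.Dict.empty K with hd0
  set d : PySem.Dict Int Int := List.foldl (fun d x => d.insert x (d.getD x 0 + 1)) d0 list with hd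
  have hgetD : ∀ v, d.getD v 0 = (list.count v : Int) := by
    intro v
    rw [hd, PySem.Dict.getD_foldl_insert_add_one, hd0, pv_d0_getD, zero_add]
  have hd0keys : d0.keys = K := by
    rw [hd0, PySem.Dict.keys_foldl_insert K (fun _ _ => (0 : Int)) PySem.Dict.empty,
      PySem.Dict.keys_empty, PySem.Set.update_nil_left, hK, PySem.Set.ofList_ofList]
  have hdkeys : d.keys = K := by
    rw [hd, PySem.Dict.keys_foldl_insert list (fun d x => d.getD x 0 + 1) d0, hd0keys, hK,
      pv_update_absorb]
  have hnodup : d.keys.Nodup := by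
    rw [hdkeys, hK]; exact PySem.Set.nodup_ofList list
  have hvals : d.values = K.map (fun k => (list.count k : Int)) := by
    rw [PySem.Dict.values_eq_map_keys d hnodup 0, hdkeys]
    exact List.map_congr_left (fun x _ => hgetD x)
  set S := PySem.List.sorted list (fun x => x) with hS
  have hSp : S.Pairwise (· ≤ ·) := hS ▸ PySem.List.sorted_pairwise list (fun x => x)
  have hSperm : S.Perm list := hS ▸ PySem.List.sorted_perm list (fun x => x) false
  set D := PySem.List.dedup S with hDdef
  have hpairs : S.foldl (fun ps v =>
      match ps.getLast? with
      | some (w, c) => if w == v then ps.dropLast ++ [(v, c + 1)] else ps ++ [(v, 1)]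
      | none => [(v, 1)]) ([] : List (Int × Int))
      = D.map (fun v => (v, (list.count v : Int))) := by
    rw [pv_runs_eq S hSp]
    exact List.map_congr_left (fun x _ => by rw [hSperm.count_eq])
  rw [hpairs, hvals]
  have hDnodup : D.Nodup := PySem.List.nodup_dedup S
  have hKnodup : K.Nodup := hK ▸ PySem.Set.nodup_ofList list
  have hDK : D.Perm K := by
    refine (List.perm_ext_iff_of_nodup hDnodup hKnodup).mpr ?_
    intro a
    rw [hDdef, PySem.List.mem_dedup, hSperm.mem_iff, hK, PySem.Set.mem_ofList]
  have hmax : (PySem.List.max? (K.map (fun k => (list.count k : Int))) (fun v => v)).getD 0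
      = (PySem.List.max? ((D.map (fun v => (v, (list.count v : Int)))).map (fun x => x.2)) (fun c => c)).getD 0 := by
    rw [List.map_map]
    have h1 : ((fun (x : Int × Int) => x.2) ∘ (fun v => (v, (list.count v : Int))))
        = fun v => (list.count v : Int) := rfl
    rw [h1]
    exact pv_max_perm _ _ ((hDK.map _).symm)
  rw [← hmax]
  set M := (PySem.List.max? (K.map (fun k => (list.count k : Int))) (fun v => v)).getD 0 with hM
  have hpred : (fun x => d.getD x 0 == M) = (fun x => ((list.count x : Int) == M)) :=
    funext (fun x => by rw [hgetD])
  rw [hdkeys, hpred]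
  have hsortfilt : PySem.List.sorted (K.filter (fun x => ((list.count x : Int) == M))) (fun x => x)
      = D.filter (fun x => ((list.count x : Int) == M)) := by
    apply PySem.List.sorted_eq_of_perm_of_pairwise_lt
    · exact hDK.filter _
    · exact List.Pairwise.sublist List.filter_sublist (pv_dedup_pairwise_lt S hSp)
  rw [hsortfilt]
  rw [List.filter_map, List.map_map]
  have h2 : ((fun (p : Int × Int) => p.2 == M) ∘ (fun v => (v, (list.count v : Int))))
      = fun v => ((list.count v : Int) == M) := rfl
  have h3 : ((fun (x : Int × Int) => x.1) ∘ (fun v => (v, (list.count v : Int)))) = id := rfl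
  rw [h2, h3, List.map_id]
  exact pv_tail _
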